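-- pv_equiv track=rewrite | github.com/w1ll-farmer/backgammon | Code/turn.py | convert_bar
-- ===== SOURCE A (Python) =====
-- def convert_bar(point):
--     base = [0]*3
--     if point < 0:
--         for i in range(0, 2):
--             if point <= i-2 and i ==0 or point == i-2:
--                 base[i]=1
--     elif point > 0:
--         for i in range(0, 3):
--             if point >= i and i == 2 or point == i:
--                 base[i]=1
--     return base
-- ===== SOURCE B (Python) =====
-- def convert_bar(point):
--     if point <= -2:
--         return [1, 0, 0]
--     if point == -1 or point == 1:
--         return [0, 1, 0]
--     if point >= 2:
--         return [0, 0, 1]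
--     return [0, 0, 0]
-- ===== Notes on version B (the rewrite author's own statement) =====
-- stated objective: simpler
-- what changed: Replaced the two index-mutating loops over a base list with a direct closed-form branch cascade returning a fresh list literal per bucket.
import Mathlib
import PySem

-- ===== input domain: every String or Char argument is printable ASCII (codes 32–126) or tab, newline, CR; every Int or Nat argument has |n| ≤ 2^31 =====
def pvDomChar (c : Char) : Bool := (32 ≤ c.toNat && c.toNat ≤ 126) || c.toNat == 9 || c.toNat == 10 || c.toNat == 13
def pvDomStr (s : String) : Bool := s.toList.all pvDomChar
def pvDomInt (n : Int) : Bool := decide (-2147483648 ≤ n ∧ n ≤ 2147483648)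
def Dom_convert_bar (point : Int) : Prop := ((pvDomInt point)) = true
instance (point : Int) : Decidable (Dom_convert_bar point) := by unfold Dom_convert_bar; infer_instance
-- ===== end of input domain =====

-- B replaces A's two index-mutating loops with a closed-form branch cascade (objective: simpler).


-- ===== PORT A =====
-- literal transliteration of A: base = [0,0,0], loops setting indices
def convert_bar (point : Int) : List Int :=
  let base : List Int := [0, 0, 0]
  if point < 0 then
    (List.range 2).foldl (fun (base : List Int) (i : Nat) =>
      if (point ≤ (i : Int) - 2 ∧ i = 0) ∨ point = (i : Int) - 2 then base.set i 1 else base) base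
  else if point > 0 then
    (List.range 3).foldl (fun (base : List Int) (i : Nat) =>
      if (point ≥ (i : Int) ∧ i = 2) ∨ point = (i : Int) then base.set i 1 else base) base
  else base

-- ===== PORT B =====
-- B: closed-form branch cascade
def convert_bar_alt (point : Int) : List Int :=
  if point ≤ -2 then [1, 0, 0]
  else if point = -1 ∨ point = 1 then [0, 1, 0]
  else if point ≥ 2 then [0, 0, 1]
  else [0, 0, 0]

-- ===== PRECONDITION & SPEC =====
def Spec_convert_bar (point : Int) (out : List Int) : Prop := out = convert_bar_alt point
instance (point : Int) (out : List Int) : Decidable (Spec_convert_bar point out) := by unfold Spec_convert_bar; infer_instance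

-- ===== CLAIM (what is proved, stated in full; the proofs are below) =====
def Claim_equal_convert_bar : Prop := ∀ (point : Int), Dom_convert_bar point → Spec_convert_bar point (convert_bar point)

-- ===== LEMMAS AND PROOFS =====

-- ===== VERDICT (by name: the statement is the Claim_ definition above) =====
theorem convert_bar_spec : Claim_equal_convert_bar := by
  intro point _
  unfold Spec_convert_bar convert_bar convert_bar_alt
  simp only [List.range, List.range.loop, List.foldl]
  norm_num
  split_ifs <;> first | rfl | (exfalso; omega)
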